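-- pv_equiv track=rewrite | github.com/stigsec/Mab-Cipher | v1.3/mabcapi.py | modify_alphabet
-- ===== SOURCE A (Python) =====
-- import sys, os, string
--
-- alphabet =  string.ascii_lowercase + \
--            '1234567890`~!@#$%^&*()-_=+[{]};:.,?"/\'' + \
--            string.ascii_uppercase
--
-- def modify_alphabet(pwd1):
--     alphabet_list = list(alphabet)
--     for char in pwd1:
--         if char in alphabet_list:
--             alphabet_list.remove(char)
--     modified_alphabet = ''.join(alphabet_list)
--     result = pwd1 + modified_alphabet
--     return result
-- ===== SOURCE B (Python) =====
-- import string
--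
-- alphabet =  string.ascii_lowercase + \
--            '1234567890`~!@#$%^&*()-_=+[{]};:.,?"/\'' + \
--            string.ascii_uppercase
--
-- def modify_alphabet(pwd1):
--     used = set(pwd1)
--     return pwd1 + ''.join(c for c in alphabet if c not in used)
-- ===== Notes on version B (the rewrite author's own statement) =====
-- stated objective: faster
-- what changed: Instead of scanning pwd1 and deleting each found character from a mutable list via list.remove (a linear scan plus shift per character), B builds a set of pwd1's characters once and makes a single pass over the fixed alphabet keeping the characters not in that set.
import Mathlib
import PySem

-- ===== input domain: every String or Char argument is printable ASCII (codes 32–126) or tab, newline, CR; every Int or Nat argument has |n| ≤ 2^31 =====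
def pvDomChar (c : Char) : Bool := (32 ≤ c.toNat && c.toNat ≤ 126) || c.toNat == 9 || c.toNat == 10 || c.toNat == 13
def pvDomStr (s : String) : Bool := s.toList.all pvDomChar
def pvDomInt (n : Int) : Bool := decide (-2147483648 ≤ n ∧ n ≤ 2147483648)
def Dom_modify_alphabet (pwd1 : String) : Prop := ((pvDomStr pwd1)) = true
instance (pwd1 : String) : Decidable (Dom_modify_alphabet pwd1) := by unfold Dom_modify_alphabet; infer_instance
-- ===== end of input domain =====

-- B builds the set of pwd1's characters once and filters the fixed alphabet in one pass,
-- instead of A's repeated list.remove scans; objective: faster (constant-factor).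

-- the module-level constant 'alphabet'
def pvAlphabet : String :=
  "abcdefghijklmnopqrstuvwxyz1234567890`~!@#$%^&*()-_=+[{]};:.,?\"/'ABCDEFGHIJKLMNOPQRSTUVWXYZ"

-- ===== PORT A =====
def modify_alphabet (pwd1 : String) : String :=
  let alphabet_list :=
    pwd1.toList.foldl
      (fun l char => if char ∈ l then (PySem.List.remove? l char).getD l else l)
      pvAlphabet.toList
  let modified_alphabet := String.mk alphabet_list
  pwd1 ++ modified_alphabet

-- ===== PORT B =====
def modify_alphabet_alt (pwd1 : String) : String :=
  let used : PySem.Set Char := PySem.Set.ofList pwd1.toList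
  pwd1 ++ String.mk (pvAlphabet.toList.filter (fun c => !(PySem.Set.contains used c)))

-- ===== PRECONDITION & SPEC =====
def Spec_modify_alphabet (pwd1 : String) (out : String) : Prop := out = modify_alphabet_alt pwd1
instance (pwd1 : String) (out : String) : Decidable (Spec_modify_alphabet pwd1 out) := by unfold Spec_modify_alphabet; infer_instance

-- ===== CLAIM (what is proved, stated in full; the proofs are below) =====
def Claim_equal_modify_alphabet : Prop := ∀ (pwd1 : String), Dom_modify_alphabet pwd1 → Spec_modify_alphabet pwd1 (modify_alphabet pwd1)

-- ===== LEMMAS AND PROOFS =====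

-- A's loop over pwd1, started from any duplicate-free list, is a filter by non-membership in pwd1.
theorem pv_fold_remove_eq_filter (cs : List Char) :
    ∀ l : List Char, l.Nodup →
      cs.foldl (fun l char => if char ∈ l then (PySem.List.remove? l char).getD l else l) l
        = l.filter (fun x => !cs.contains x) := by
  induction cs with
  | nil => intro l _; simp
  | cons c cs ih =>
    intro l hl
    simp only [List.foldl_cons]
    by_cases hc : c ∈ l
    · rw [if_pos hc, PySem.List.remove?_eq_some_erase l c hc, Option.getD_some,
        ih _ (hl.erase c), hl.erase_eq_filter, List.filter_filter]
      refine List.filter_congr ?_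
      intro x _
      simp [bne, beq_eq_decide, eq_comm, Bool.and_comm]
    · rw [if_neg hc, ih _ hl]
      refine List.filter_congr ?_
      intro x hx
      have : x ≠ c := fun h => hc (h ▸ hx)
      simp [this]

theorem pv_alphabet_nodup : pvAlphabet.toList.Nodup := by decide

-- ===== VERDICT (by name: the statement is the Claim_ definition above) =====
theorem modify_alphabet_spec : Claim_equal_modify_alphabet := by
  intro pwd1 _
  unfold Spec_modify_alphabet modify_alphabet modify_alphabet_alt
  simp only [pv_fold_remove_eq_filter _ _ pv_alphabet_nodup]
  congr 1
  congr 1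
  refine List.filter_congr ?_
  intro x _
  simp [PySem.Set.contains_eq_listContains]
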